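-- pv_equiv track=rewrite | github.com/GitPaean/opm-reference-manual | scripts/python/migrate_docs.py | _merge_cell_parts
-- ===== SOURCE A (Python) =====
-- def _merge_cell_parts(parts: list[str]) -> str:
--     """Join multi-line cell content.
--
--     Consecutive non-empty lines are joined with a space.  An empty line
--     (from a blank data row) inserts a ``<br>`` to preserve paragraph breaks.
--     """
--     paragraphs: list[str] = []
--     current: list[str] = []
--     for part in parts:
--         if part:
--             current.append(part)
--         else:
--             if current:
--                 paragraphs.append(" ".join(current))
--                 current = []
--     if current:
--         paragraphs.append(" ".join(current))
--     return "<br>".join(paragraphs) if paragraphs else ""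
-- ===== SOURCE B (Python) =====
-- def _merge_cell_parts(parts: list[str]) -> str:
--     """Join multi-line cell content.
--
--     Scans the list backwards and lays out the output pieces directly: a
--     non-empty line is preceded (in the final text) by ' ' when the
--     following line is non-empty, by '<br>' when some text already lies
--     to its right (a paragraph break), and by nothing otherwise.  The
--     pieces, gathered in reverse, are joined once at the end; no
--     paragraph list or line buffer is maintained.
--     """
--     pieces: list[str] = []
--     nxt = ""
--     for part in reversed(parts):
--         if part:
--             if nxt:
--                 pieces.append(" ")
--             elif pieces:
--                 pieces.append("<br>")
--             pieces.append(part)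
--         nxt = part
--     return "".join(reversed(pieces))
-- ===== Notes on version B (the rewrite author's own statement) =====
-- stated objective: alternative
-- what changed: Replaces A's forward buffer-and-flush accumulation (collect a current run, flush space-joined runs to a paragraphs list on blanks, '<br>'-join at the end) with a single backwards pass that lays out the output pieces directly, choosing each non-empty line's separator (' ', '<br>' or none) by one-element lookahead and joining the reversed pieces once; no paragraph list or run buffer is maintained.
import Mathlib
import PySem

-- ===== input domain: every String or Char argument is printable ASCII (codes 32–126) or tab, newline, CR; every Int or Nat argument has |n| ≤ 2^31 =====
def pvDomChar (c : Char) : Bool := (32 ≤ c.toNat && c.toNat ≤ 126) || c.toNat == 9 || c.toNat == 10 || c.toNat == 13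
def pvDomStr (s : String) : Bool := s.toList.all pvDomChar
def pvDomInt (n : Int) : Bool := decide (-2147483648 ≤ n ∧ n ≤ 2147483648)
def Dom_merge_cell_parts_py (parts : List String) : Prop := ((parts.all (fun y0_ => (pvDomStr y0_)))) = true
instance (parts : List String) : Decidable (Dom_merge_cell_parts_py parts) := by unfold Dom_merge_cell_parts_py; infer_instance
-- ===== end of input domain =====

-- B replaces A's forward buffer-and-flush accumulation with a single backwards
-- pass that builds the result string directly via one-element lookahead
-- (alternative decomposition; same O(n) cost).


-- ===== PORT A =====
-- one iteration of A's loop: state = (paragraphs, current)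
def mergeStepA (st : List String × List String) (part : String) : List String × List String :=
  if part ≠ "" then (st.1, st.2 ++ [part])
  else if st.2 ≠ [] then (st.1 ++ [PySem.Str.join " " st.2], []) else st

def merge_cell_parts_py (parts : List String) : String :=
  let st := parts.foldl mergeStepA ([], [])
  let paragraphs := if st.2 ≠ [] then st.1 ++ [PySem.Str.join " " st.2] else st.1
  if paragraphs ≠ [] then PySem.Str.join "<br>" paragraphs else ""

-- ===== PORT B =====
-- one iteration of B's reversed loop (as a foldr step): state = (pieces, nxt),
-- pieces in gathering (reversed) order, nxt the element that FOLLOWS the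
-- current one in the original order
def mergeStepB (part : String) (st : List String × String) : List String × String :=
  ( if part ≠ "" then
      (if st.2 ≠ "" then st.1 ++ [" "]
       else if st.1 ≠ [] then st.1 ++ ["<br>"]
       else st.1) ++ [part]
    else st.1,
    part )

def merge_cell_parts_py_alt (parts : List String) : String :=
  PySem.Str.join "" ((parts.foldr mergeStepB ([], "")).1).reverse

-- ===== PRECONDITION & SPEC =====
def Spec_merge_cell_parts_py (parts : List String) (out : String) : Prop := out = merge_cell_parts_py_alt parts
instance (parts : List String) (out : String) : Decidable (Spec_merge_cell_parts_py parts out) := by unfold Spec_merge_cell_parts_py; infer_instance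

-- ===== CLAIM (what is proved, stated in full; the proofs are below) =====
def Claim_equal_merge_cell_parts_py : Prop := ∀ (parts : List String), Dom_merge_cell_parts_py parts → Spec_merge_cell_parts_py parts (merge_cell_parts_py parts)

-- ===== LEMMAS AND PROOFS =====

-- string-level corollaries of the PySem.Chars join lemmas
theorem strJoin_nil (sep : String) : PySem.Str.join sep [] = "" := by
  apply String.toList_inj.mp
  simp [PySem.Str.toList_join, PySem.Chars.join_nil]

theorem strJoin_singleton (sep a : String) : PySem.Str.join sep [a] = a := by
  apply String.toList_inj.mp
  simp [PySem.Str.toList_join, PySem.Chars.join_singleton]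

theorem strJoin_cons_cons (sep p q : String) (rest : List String) :
    PySem.Str.join sep (p :: q :: rest) = p ++ sep ++ PySem.Str.join sep (q :: rest) := by
  apply String.toList_inj.mp
  simp [PySem.Str.toList_join, PySem.Chars.join_cons_cons, String.toList_append]

theorem strJoin_cons_append (sep x y : String) (rest : List String) :
    PySem.Str.join sep ((x ++ y) :: rest) = x ++ PySem.Str.join sep (y :: rest) := by
  cases rest with
  | nil => rw [strJoin_singleton, strJoin_singleton]
  | cons r rs =>
    rw [strJoin_cons_cons, strJoin_cons_cons]
    simp [String.append_assoc]

theorem strJoin_empty_cons (a : String) (rest : List String) :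
    PySem.Str.join "" (a :: rest) = a ++ PySem.Str.join "" rest := by
  cases rest with
  | nil => rw [strJoin_singleton, strJoin_nil]; simp
  | cons r rs => rw [strJoin_cons_cons]; simp

-- reference paragraph-list: what A's loop produces from state (…, cur) on the remaining input
def mergeFrom (cur : List String) : List String → List String
  | [] => if cur ≠ [] then [PySem.Str.join " " cur] else []
  | p :: ps =>
    if p ≠ "" then mergeFrom (cur ++ [p]) ps
    else (if cur ≠ [] then [PySem.Str.join " " cur] else []) ++ mergeFrom [] ps

theorem mergeFrom_spec (parts : List String) : ∀ (paras cur : List String),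
    (let st := parts.foldl mergeStepA (paras, cur)
     if st.2 ≠ [] then st.1 ++ [PySem.Str.join " " st.2] else st.1) =
      paras ++ mergeFrom cur parts := by
  induction parts with
  | nil => intro paras cur; by_cases h : cur = [] <;> simp [mergeFrom, h]
  | cons p ps ih =>
    intro paras cur
    by_cases hp : p = ""
    · by_cases hc : cur = [] <;>
        simp [mergeFrom, mergeStepA, hp, hc, List.foldl_cons, ih]
    · simp [mergeFrom, mergeStepA, hp, List.foldl_cons, ih]

-- mergeFrom with a nonempty buffer emits one paragraph spanning the nonempty run
theorem mergeFrom_run (xs : List String) : ∀ (cur : List String), cur ≠ [] →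
    mergeFrom cur xs =
      PySem.Str.join " " (cur ++ xs.takeWhile (fun y => decide (y ≠ ""))) ::
        mergeFrom [] (xs.dropWhile (fun y => decide (y ≠ ""))) := by
  induction xs with
  | nil => intro cur hc; simp [mergeFrom, hc]
  | cons x xs ih =>
    intro cur hc
    by_cases hx : x = ""
    · simp [mergeFrom, hx, hc, List.takeWhile, List.dropWhile]
    · simp only [mergeFrom, if_pos (by simpa using hx), List.takeWhile_cons, List.dropWhile_cons,
        decide_eq_true (show x ≠ "" from hx)]
      rw [ih (cur ++ [x]) (by simp)]
      simp

theorem mergeFrom_cons_ne (q : String) (qs : List String) (hq : q ≠ "") :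
    mergeFrom [] (q :: qs) ≠ [] := by
  have h : mergeFrom [] (q :: qs) = mergeFrom [q] qs := by simp [mergeFrom, hq]
  rw [h, mergeFrom_run qs [q] (by simp)]
  simp

-- the invariant of B's backwards pass: nxt is the suffix's first element,
-- pieces is empty iff A emits no paragraph, and the joined reversed pieces
-- are A's merged string of the suffix
theorem foldrB_inv (l : List String) :
    (l.foldr mergeStepB ([], "")).2 = l.headD "" ∧
    ((l.foldr mergeStepB ([], "")).1 = [] ↔ mergeFrom [] l = []) ∧
    PySem.Str.join "" ((l.foldr mergeStepB ([], "")).1).reverse =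
      PySem.Str.join "<br>" (mergeFrom [] l) := by
  induction l with
  | nil => exact ⟨rfl, by simp [mergeFrom], rfl⟩
  | cons p ps ih =>
    obtain ⟨ih1, ih2, ih3⟩ := ih
    rw [List.foldr_cons]
    set st := ps.foldr mergeStepB ([], "") with hst
    by_cases hp : p = ""
    · subst hp
      have h2 : mergeFrom [] ("" :: ps) = mergeFrom [] ps := by simp [mergeFrom]
      refine ⟨rfl, ?_, ?_⟩ <;> simp [mergeStepB, h2, ih2, ih3]
    · have hm : mergeFrom [] (p :: ps) = mergeFrom [p] ps := by
        simp [mergeFrom, hp]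
      refine ⟨rfl, ?_, ?_⟩
      · simp [mergeStepB, hp, mergeFrom_cons_ne p ps hp]
      · simp only [mergeStepB, if_pos (by simpa using hp)]
        cases ps with
        | nil =>
          have hst0 : st = ([], "") := rfl
          rw [hst0]
          simp [mergeFrom, hp, strJoin_singleton]
        | cons q qs =>
          have hnxt : st.2 = q := by rw [ih1]; rfl
          by_cases hq : q = ""
          · rw [hnxt, if_neg (by simp [hq])]
            have h1 : mergeFrom [p] ("" :: qs) = p :: mergeFrom [] qs := by
              rw [mergeFrom, if_neg (by simp), if_pos (by simp)]
              simp [strJoin_singleton]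
            have h2 : mergeFrom [] ("" :: qs) = mergeFrom [] qs := by simp [mergeFrom]
            rw [hm, hq, h1]
            rw [hq, h2] at ih2 ih3
            by_cases hP : st.1 = []
            · have : mergeFrom [] qs = [] := ih2.mp hP
              rw [this, if_neg (by simp [hP]), hP]
              simp [strJoin_singleton]
            · rw [if_pos hP]
              cases hr : mergeFrom [] qs with
              | nil => exact absurd (ih2.mpr hr) hP
              | cons h t =>
                rw [strJoin_cons_cons]
                rw [hr] at ih3
                rw [← ih3]
                simp only [List.reverse_append, List.reverse_cons, List.reverse_nil,
                  List.nil_append, List.cons_append]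
                rw [strJoin_empty_cons, strJoin_empty_cons]
                simp [String.append_assoc]
          · rw [hnxt, if_pos (by simpa using hq)]
            have hPne : st.1 ≠ [] := fun h => mergeFrom_cons_ne q qs hq (ih2.mp h)
            rw [hm, mergeFrom_run (q :: qs) [p] (by simp)]
            have hm2 : mergeFrom [] (q :: qs) = mergeFrom [q] qs := by
              simp [mergeFrom, hq]
            rw [hm2, mergeFrom_run qs [q] (by simp)] at ih3
            rw [List.takeWhile_cons_of_pos (by simpa using hq),
              List.dropWhile_cons_of_pos (by simpa using hq)]
            have hj : PySem.Str.join " " ([p] ++ q :: qs.takeWhile (fun y => decide (y ≠ ""))) =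
                p ++ " " ++ PySem.Str.join " " ([q] ++ qs.takeWhile (fun y => decide (y ≠ ""))) := by
              simp only [List.singleton_append]
              exact strJoin_cons_cons " " p q _
            rw [hj, strJoin_cons_append, ← ih3]
            simp only [List.reverse_append, List.reverse_cons, List.reverse_nil,
              List.nil_append, List.cons_append]
            rw [strJoin_empty_cons, strJoin_empty_cons]
            simp [String.append_assoc]

-- A's result is the "<br>"-join of the reference paragraph list
theorem portA_eq_join (parts : List String) :
    merge_cell_parts_py parts = PySem.Str.join "<br>" (mergeFrom [] parts) := by
  simp only [merge_cell_parts_py]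
  rw [mergeFrom_spec parts [] [], List.nil_append]
  split
  · rfl
  · next h => rw [not_ne_iff.mp h, strJoin_nil]

-- ===== VERDICT (by name: the statement is the Claim_ definition above) =====
theorem merge_cell_parts_py_spec : Claim_equal_merge_cell_parts_py := by
  intro parts _
  simp only [Spec_merge_cell_parts_py, merge_cell_parts_py_alt, (foldrB_inv parts).2.2]
  exact portA_eq_join parts
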